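-- pv_equiv track=rewrite | github.com/janahmedprg/Program-Projects | randomTestCode.py | get_first_year
-- ===== SOURCE A (Python) =====
-- def get_first_year(commands: [str]) -> [str]:
--     result = []
--     taking = True
--     for command in commands:
--         if command == "Happy new year":
--             taking = False
--         elif taking:
--             result.append(command)
--     return result
-- ===== SOURCE B (Python) =====
-- def get_first_year(commands):
--     try:
--         return list(commands[:commands.index("Happy new year")])
--     except ValueError:
--         return list(commands)
-- ===== Notes on version B (the rewrite author's own statement) =====
-- stated objective: simpler
-- what changed: replaces the per-element flag-and-append loop with locate-the-first-sentinel (list.index in try/except) followed by one bulk slice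
import Mathlib
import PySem

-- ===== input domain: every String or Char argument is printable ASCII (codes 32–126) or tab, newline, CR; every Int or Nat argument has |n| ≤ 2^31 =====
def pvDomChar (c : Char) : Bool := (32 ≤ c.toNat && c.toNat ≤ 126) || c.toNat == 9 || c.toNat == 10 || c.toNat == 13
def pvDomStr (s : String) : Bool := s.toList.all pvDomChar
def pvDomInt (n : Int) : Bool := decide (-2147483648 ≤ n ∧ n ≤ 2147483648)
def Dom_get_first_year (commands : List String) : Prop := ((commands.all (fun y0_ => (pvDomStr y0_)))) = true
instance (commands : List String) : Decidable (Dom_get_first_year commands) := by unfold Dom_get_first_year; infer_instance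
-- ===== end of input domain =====

-- B replaces A's per-element flag-and-append loop by locating the first sentinel and taking one slice.
-- ===== PORT A =====
-- the for-loop of A, as structural recursion over the same (result, taking) state
def getFirstYearLoop (commands result : List String) (taking : Bool) : List String :=
  match commands with
  | [] => result
  | command :: rest =>
    if command == "Happy new year" then getFirstYearLoop rest result false
    else if taking then getFirstYearLoop rest (result ++ [command]) taking
    else getFirstYearLoop rest result taking

def get_first_year (commands : List String) : List String :=
  getFirstYearLoop commands [] true

-- ===== PORT B =====
def get_first_year_alt (commands : List String) : List String :=
  match PySem.List.index? commands "Happy new year" with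
  | some i => PySem.List.slice commands none (some (i : Int))
  | none => commands

-- ===== PRECONDITION & SPEC =====
def Spec_get_first_year (commands : List String) (out : List String) : Prop := out = get_first_year_alt commands
instance (commands : List String) (out : List String) : Decidable (Spec_get_first_year commands out) := by unfold Spec_get_first_year; infer_instance

-- ===== CLAIM (what is proved, stated in full; the proofs are below) =====
def Claim_equal_get_first_year : Prop := ∀ (commands : List String), Dom_get_first_year commands → Spec_get_first_year commands (get_first_year commands)

-- ===== LEMMAS AND PROOFS =====
theorem loop_not_taking (commands result : List String) :
    getFirstYearLoop commands result false = result := by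
  induction commands generalizing result with
  | nil => rfl
  | cons x xs ih =>
    unfold getFirstYearLoop
    by_cases hx : x = "Happy new year" <;> simp [hx, ih]

theorem loop_taking (commands result : List String) :
    getFirstYearLoop commands result true
      = result ++ commands.takeWhile (fun c => c ≠ "Happy new year") := by
  induction commands generalizing result with
  | nil => simp [getFirstYearLoop]
  | cons x xs ih =>
    unfold getFirstYearLoop
    by_cases hx : x = "Happy new year"
    · simp [hx, loop_not_taking]
    · simp [hx, ih]

theorem altB_eq (commands : List String) :
    get_first_year_alt commands = commands.takeWhile (fun c => c ≠ "Happy new year") := by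
  unfold get_first_year_alt
  rcases h : PySem.List.index? commands "Happy new year" with _ | i
  · rw [List.takeWhile_eq_self_iff.mpr]
    intro x hx
    have hn := (PySem.List.index?_eq_none_iff (xs := commands) (v := "Happy new year")).mp h
    simp only [decide_eq_true_eq]
    rintro rfl; exact hn hx
  · obtain ⟨pre, suf, rfl, rfl, hnot⟩ :=
      (PySem.List.index?_eq_some_iff commands "Happy new year" i).mp h
    simp only []
    rw [PySem.List.slice_to_natCast, List.take_left' rfl, List.takeWhile_append]
    have hpre : pre.takeWhile (fun c => c ≠ "Happy new year") = pre :=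
      List.takeWhile_eq_self_iff.mpr (by
        intro x hx; simp only [decide_eq_true_eq]; rintro rfl; exact hnot hx)
    simp only [ne_eq, decide_not] at hpre
    simp [hpre]

-- ===== VERDICT (by name: the statement is the Claim_ definition above) =====
theorem get_first_year_spec : Claim_equal_get_first_year := by
  intro commands _
  unfold Spec_get_first_year get_first_year
  rw [loop_taking, altB_eq, List.nil_append]
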